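-- pv_equiv track=rewrite | github.com/joba2008/budget_system | budget_system/apps/importer/validators.py | validate_duplicate_rows
-- ===== SOURCE A (Python) =====
-- def validate_duplicate_rows(rows):
--     """Check for duplicate rows (same version + cc + glc)."""
--     errors = []
--     seen = {}
--     for idx, row in enumerate(rows, start=2):
--         key = (row.get('version', ''), row.get('cc', ''), row.get('glc', ''))
--         if key in seen:
--             errors.append(
--                 f'Row {idx}: duplicate entry (version={key[0]}, cc={key[1]}, glc={key[2]}) '
--                 f'- same as row {seen[key]}'
--             )
--         else:
--             seen[key] = idx
--     return errors
-- ===== SOURCE B (Python) =====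
-- def validate_duplicate_rows(rows):
--     """Check for duplicate rows (same version + cc + glc)."""
--     groups = {}
--     for idx, row in enumerate(rows, start=2):
--         key = (row.get('version', ''), row.get('cc', ''), row.get('glc', ''))
--         groups[key] = groups.get(key, []) + [idx]
--     dups = []
--     for key, idxs in groups.items():
--         dups = dups + [(i, idxs[0], key) for i in idxs[1:]]
--     dups.sort(key=lambda t: t[0])
--     return [
--         f'Row {i}: duplicate entry (version={key[0]}, cc={key[1]}, glc={key[2]}) '
--         f'- same as row {first}'
--         for i, first, key in dups
--     ]
-- ===== Notes on version B (the rewrite author's own statement) =====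
-- stated objective: alternative
-- what changed: Replaces the single-pass seen-dict loop by a staged group-and-sort pipeline: first group all row indices per key into a dict of lists, then emit one tuple per non-first index of each group and sort the tuples by duplicate row index before formatting.
import Mathlib
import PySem

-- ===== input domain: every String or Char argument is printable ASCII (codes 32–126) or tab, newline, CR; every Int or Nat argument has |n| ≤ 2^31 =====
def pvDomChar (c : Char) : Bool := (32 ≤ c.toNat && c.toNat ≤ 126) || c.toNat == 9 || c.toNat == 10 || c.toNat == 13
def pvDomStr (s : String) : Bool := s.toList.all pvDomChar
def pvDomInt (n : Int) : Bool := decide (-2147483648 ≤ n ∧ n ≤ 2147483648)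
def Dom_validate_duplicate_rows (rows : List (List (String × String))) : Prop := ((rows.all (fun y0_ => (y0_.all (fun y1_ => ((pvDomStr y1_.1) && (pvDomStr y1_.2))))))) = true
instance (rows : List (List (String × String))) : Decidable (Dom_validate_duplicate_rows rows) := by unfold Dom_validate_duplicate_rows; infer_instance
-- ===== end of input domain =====

-- B is an alternative decomposition: group row indices per key in one pass, then emit the
-- non-first index of every group and sort by duplicate row index (not faster, a different shape).

-- shared helpers: the key tuple and the (identical in both Pythons) message f-string
def pvKey (row : List (String × String)) : String × String × String :=
  (PySem.Dict.getD (PySem.Dict.mk row) "version" "",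
   PySem.Dict.getD (PySem.Dict.mk row) "cc" "",
   PySem.Dict.getD (PySem.Dict.mk row) "glc" "")

def pvMsg (idx : Int) (k : String × String × String) (first : Int) : String :=
  "Row " ++ PySem.Int.toStr idx ++ ": duplicate entry (version=" ++ k.1 ++
  ", cc=" ++ k.2.1 ++ ", glc=" ++ k.2.2 ++ ") - same as row " ++ PySem.Int.toStr first

-- ===== PORT A =====
def validate_duplicate_rows (rows : List (List (String × String))) : List String :=
  ((PySem.List.enumerate rows 2).foldl
    (fun (st : List String × PySem.Dict (String × String × String) Int) p =>
      let key := pvKey p.2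
      match st.2.get? key with
      | some v => (st.1 ++ [pvMsg p.1 key v], st.2)
      | none   => (st.1, st.2.insert key p.1))
    ([], PySem.Dict.empty)).1

-- ===== PORT B =====
def validate_duplicate_rows_alt (rows : List (List (String × String))) : List String :=
  -- groups[key] = groups.get(key, []) + [idx]
  let groups := (PySem.List.enumerate rows 2).foldl
    (fun (d : PySem.Dict (String × String × String) (List Int)) p =>
      d.modify (pvKey p.2) [] (fun l => l ++ [p.1])) PySem.Dict.empty
  -- dups = dups + [(i, idxs[0], key) for i in idxs[1:]]
  -- idxs[0] as headD 0 and idxs[1:] as drop 1: exact, every group list is nonempty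
  let dups := groups.items.foldl
    (fun (acc : List (Int × Int × (String × String × String))) kg =>
      acc ++ (kg.2.drop 1).map (fun i => (i, kg.2.headD 0, kg.1))) []
  (PySem.List.sorted dups (fun t => t.1) false).map (fun t => pvMsg t.1 t.2.2 t.2.1)

-- ===== PRECONDITION & SPEC =====
def Spec_validate_duplicate_rows (rows : List (List (String × String))) (out : List String) : Prop := out = validate_duplicate_rows_alt rows
instance (rows : List (List (String × String))) (out : List String) : Decidable (Spec_validate_duplicate_rows rows out) := by unfold Spec_validate_duplicate_rows; infer_instance

-- ===== CLAIM (what is proved, stated in full; the proofs are below) =====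
def Claim_equal_validate_duplicate_rows : Prop := ∀ (rows : List (List (String × String))), Dom_validate_duplicate_rows rows → Spec_validate_duplicate_rows rows (validate_duplicate_rows rows)

-- ===== LEMMAS AND PROOFS =====

-- the row index (starting at 2) of the FIRST occurrence of key k in the key list
def pvFirst (keys : List (String × String × String)) (k : String × String × String) : Int :=
  ((PySem.List.index? keys k).getD 0 : Int) + 2

-- the duplicate tuple a position (idx, k) contributes: none exactly at k's first occurrence
def pvF (keys : List (String × String × String)) (p : Int × (String × String × String)) :
    Option (Int × Int × (String × String × String)) :=
  if p.1 = pvFirst keys p.2 then none else some (p.1, pvFirst keys p.2, p.2)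

-- the duplicate tuples in row order
def pvOrd (keys : List (String × String × String)) : List (Int × Int × (String × String × String)) :=
  (PySem.List.enumerate keys 2).filterMap (pvF keys)

lemma pvEnumMap {α β : Type} (f : α → β) (l : List α) :
    ∀ n : Int, PySem.List.enumerate (l.map f) n = (PySem.List.enumerate l n).map (fun p => (p.1, f p.2)) := by
  induction l with
  | nil => intro n; simp [PySem.List.enumerate_nil]
  | cons x t ih => intro n; simp [PySem.List.enumerate_cons, ih]

lemma pvA_loop (keys : List (String × String × String)) :
    ∀ (rest pre : List (String × String × String)), keys = pre ++ rest →
      ∀ (errs : List String) (seen : PySem.Dict (String × String × String) Int),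
      (∀ k, seen.get? k = Option.map (fun j : Nat => ((j : Int) + 2)) (PySem.List.index? pre k)) →
      ((PySem.List.enumerate rest ((pre.length : Int) + 2)).foldl
        (fun (st : List String × PySem.Dict (String × String × String) Int) p =>
          match st.2.get? p.2 with
          | some v => (st.1 ++ [pvMsg p.1 p.2 v], st.2)
          | none   => (st.1, st.2.insert p.2 p.1))
        (errs, seen)).1
      = errs ++ ((PySem.List.enumerate rest ((pre.length : Int) + 2)).filterMap (pvF keys)).map
          (fun t => pvMsg t.1 t.2.2 t.2.1) := by
  intro rest
  induction rest with
  | nil => intro pre _ errs seen _; simp [PySem.List.enumerate_nil]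
  | cons r rest ih =>
    intro pre hk errs seen hseen
    rw [PySem.List.enumerate_cons]
    simp only [List.foldl_cons, List.filterMap_cons]
    have hlen : ((pre.length : Int) + 2) + 1 = (((pre ++ [r]).length : Int) + 2) := by
      simp; ring
    by_cases hmem : r ∈ pre
    · obtain ⟨j, hj⟩ : ∃ j, PySem.List.index? pre r = some j :=
        Option.isSome_iff_exists.mp ((PySem.List.index?_isSome_iff pre r).mpr hmem)
      have hget : seen.get? r = some ((j : Int) + 2) := by
        rw [hseen r, hj]; rfl
      have hjlt : j < pre.length := (PySem.List.getElem_of_index?_eq_some hj).1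
      have hfirst : pvFirst keys r = (j : Int) + 2 := by
        unfold pvFirst
        rw [hk, PySem.List.index?_append_of_mem _ hmem, hj]
        rfl
      have hF : pvF keys ((pre.length : Int) + 2, r) = some ((pre.length : Int) + 2, (j : Int) + 2, r) := by
        unfold pvF
        simp only [hfirst]
        rw [if_neg (by omega)]
      rw [hF, hget]
      simp only []
      rw [hlen, ih (pre ++ [r]) (by simpa using hk) _ seen ?_]
      · simp
      · intro k
        by_cases hkp : k ∈ pre
        · rw [PySem.List.index?_append_of_mem _ hkp]; exact hseen k
        · by_cases hkr : k = r
          · exact absurd hmem (hkr ▸ hkp)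
          · have h1 : PySem.List.index? (pre ++ [r]) k = none := by
              rw [PySem.List.index?_eq_none_iff]
              simp [hkp, hkr]
            have h2 : PySem.List.index? pre k = none :=
              (PySem.List.index?_eq_none_iff pre k).mpr hkp
            rw [h1]
            have h := hseen k
            rw [h2] at h; simpa using h
    · have hnone : PySem.List.index? pre r = none :=
        (PySem.List.index?_eq_none_iff pre r).mpr hmem
      have hget : seen.get? r = none := by
        rw [hseen r, hnone]; rfl
      have hidx : PySem.List.index? keys r = some pre.length := by
        rw [PySem.List.index?_eq_some_iff]
        exact ⟨pre, rest, hk, rfl, hmem⟩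
      have hF : pvF keys ((pre.length : Int) + 2, r) = none := by
        unfold pvF pvFirst
        rw [hidx]
        simp
      rw [hF, hget]
      simp only []
      rw [hlen, ih (pre ++ [r]) (by simpa using hk) _ _ ?_]
      · intro k
        by_cases hkr : k = r
        · subst hkr
          rw [PySem.Dict.get?_insert_self, PySem.List.index?_append_singleton_self _ _ hmem]
          simp
        · rw [PySem.Dict.get?_insert_of_ne _ _ hkr]
          by_cases hkp : k ∈ pre
          · rw [PySem.List.index?_append_of_mem _ hkp]; exact hseen k
          · have h1 : PySem.List.index? (pre ++ [r]) k = none := by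
              rw [PySem.List.index?_eq_none_iff]; simp [hkp, hkr]
            have h2 : PySem.List.index? pre k = none :=
              (PySem.List.index?_eq_none_iff pre k).mpr hkp
            rw [h1]
            have h := hseen k
            rw [h2] at h; simpa using h

-- structure of one key group inside the enumeration
lemma pvGrp (k : String × String × String) :
    ∀ (keys : List (String × String × String)), k ∈ keys → ∀ n : Int,
      ∃ (j : Nat) (t : List (Int × (String × String × String))),
        PySem.List.index? keys k = some j ∧
        (PySem.List.enumerate keys n).filter (fun q => q.2 == k) = (n + (j : Int), k) :: t ∧
        ∀ p ∈ t, p.2 = k ∧ n + (j : Int) < p.1 := by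
  intro keys
  induction keys with
  | nil => intro h; exact absurd h (List.not_mem_nil)
  | cons x ks ih =>
    intro hmem n
    rw [PySem.List.enumerate_cons]
    by_cases hx : x = k
    · subst hx
      refine ⟨0, (PySem.List.enumerate ks (n + 1)).filter (fun q => q.2 == x), ?_, ?_, ?_⟩
      · exact PySem.List.index?_cons_self x ks
      · simp
      · intro p hp
        have hp2 := List.of_mem_filter hp
        have hpm := List.mem_of_mem_filter hp
        rw [PySem.List.mem_enumerate_iff] at hpm
        obtain ⟨m, hm, rfl⟩ := hpm
        refine ⟨by simpa using hp2, by push_cast; omega⟩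
    · have hk : k ∈ ks := by
        rcases List.mem_cons.mp hmem with h | h
        · exact absurd h.symm hx
        · exact h
      obtain ⟨j, t, hj, hfil, hprop⟩ := ih hk (n + 1)
      refine ⟨j + 1, t, ?_, ?_, ?_⟩
      · rw [PySem.List.index?_cons_of_ne ks hx, hj]; rfl
      · rw [List.filter_cons_of_neg (by simpa using hx), hfil]
        congr 2
        push_cast; ring
      · intro p hp
        obtain ⟨h1, h2⟩ := hprop p hp
        exact ⟨h1, by push_cast at h2 ⊢; omega⟩

-- a list is a permutation of the concatenation of its classes
lemma pvPartition {α κ : Type} [BEq κ] [LawfulBEq κ] (f : α → κ) :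
    ∀ (cs : List κ) (l : List α), (∀ x ∈ l, f x ∈ cs) → cs.Nodup →
      l.Perm (cs.flatMap (fun c => l.filter (fun x => f x == c))) := by
  intro cs
  induction cs with
  | nil =>
    intro l h _
    cases l with
    | nil => simp
    | cons y t => exact absurd (h y (List.mem_cons_self)) (List.not_mem_nil)
  | cons c cs ih =>
    intro l h hnd
    rw [List.flatMap_cons]
    have hper := (List.filter_append_perm (fun x => f x == c) l).symm
    have hcs : ∀ x ∈ l.filter (fun x => !(f x == c)), f x ∈ cs := by
      intro x hx
      have h1 := List.of_mem_filter hx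
      have h2 := h x (List.mem_of_mem_filter hx)
      rcases List.mem_cons.mp h2 with he | he
      · simp [he] at h1
      · exact he
    have hrec := ih (l.filter (fun x => !(f x == c))) hcs (List.Nodup.of_cons hnd)
    have hflt : ∀ c' ∈ cs, (l.filter (fun x => !(f x == c))).filter (fun x => f x == c')
        = l.filter (fun x => f x == c') := by
      intro c' hc'
      have hne : c' ≠ c := by
        intro he; subst he
        exact (List.nodup_cons.mp hnd).1 hc'
      rw [List.filter_filter]
      apply List.filter_congr
      intro x _
      by_cases hfx : f x = c'
      · simp [hfx, hne]
      · simp [hfx]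
    have hflat : cs.flatMap (fun c' => (l.filter (fun x => !(f x == c))).filter (fun x => f x == c'))
        = cs.flatMap (fun c' => l.filter (fun x => f x == c')) :=
      List.flatMap_congr hflt
    exact hper.trans (List.Perm.append_left _ (hflat ▸ hrec))

lemma pvB_eq_ord (keys : List (String × String × String)) :
    PySem.List.sorted
      (((PySem.List.enumerate keys 2).foldl
          (fun (d : PySem.Dict (String × String × String) (List Int)) q =>
            d.modify q.2 [] (fun l => l ++ [q.1])) PySem.Dict.empty).items.foldl
        (fun (acc : List (Int × Int × (String × String × String))) kg =>
          acc ++ (kg.2.drop 1).map (fun i => (i, kg.2.headD 0, kg.1))) [])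
      (fun t => t.1) false = pvOrd keys := by
  set P := PySem.List.enumerate keys 2 with hP
  set G := P.foldl (fun (d : PySem.Dict (String × String × String) (List Int)) q =>
    d.modify q.2 [] (fun l => l ++ [q.1])) PySem.Dict.empty with hGdef
  have hfold : G = (P.map (fun q => (q.2, q.1))).foldl
      (fun d p => d.modify p.1 [] (fun l => l ++ [p.2])) PySem.Dict.empty := by
    rw [List.foldl_map]
  have hG : ∀ k, G.getD k [] = (P.filter (fun q => q.2 == k)).map (fun q => q.1) := by
    intro k
    rw [hfold, PySem.Dict.getD_foldl_modify_append, PySem.Dict.getD_empty]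
    rw [List.filter_map, List.map_map]
    simp [Function.comp_def]
  have hkeys : G.keys = PySem.Set.ofList keys := by
    have h := PySem.Dict.keys_foldl_modify_key P (fun q => q.2) []
      (fun _ q => fun l => l ++ [q.1]) PySem.Dict.empty
    rw [hGdef]
    rw [show (fun (d : PySem.Dict (String × String × String) (List Int)) q =>
      d.modify q.2 [] (fun l => l ++ [q.1])) = (fun d x =>
      d.modify x.2 [] ((fun (_ : PySem.Dict (String × String × String) (List Int))
        (q : Int × (String × String × String)) => fun l => l ++ [q.1]) d x)) from rfl]
    rw [h, PySem.Dict.keys_empty, hP, PySem.List.map_snd_enumerate]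
    simp [PySem.Set.update, PySem.Set.ofList_eq_foldl]
  have hnd : G.keys.Nodup := by
    rw [hkeys]; exact PySem.Set.nodup_ofList keys
  have hitems : G.items = (PySem.Set.ofList keys).map (fun k => (k, G.getD k [])) := by
    rw [PySem.Dict.items_eq_map_keys G hnd [], hkeys]
  have hdups : G.items.foldl
      (fun (acc : List (Int × Int × (String × String × String))) kg =>
        acc ++ (kg.2.drop 1).map (fun i => (i, kg.2.headD 0, kg.1))) []
      = (PySem.Set.ofList keys).flatMap
        (fun k => (P.filter (fun q => q.2 == k)).filterMap (pvF keys)) := by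
    rw [PySem.List.foldl_append_eq_flatMap, List.nil_append, hitems, List.flatMap_map]
    apply List.flatMap_congr
    intro k hk
    have hkmem : k ∈ keys := (PySem.Set.mem_ofList keys k).mp hk
    obtain ⟨j, t, hj, hfil, hprop⟩ := pvGrp k keys hkmem 2
    have hfirst : pvFirst keys k = (j : Int) + 2 := by
      unfold pvFirst; rw [hj]; rfl
    rw [hG k, hfil]
    simp only [List.map_cons, List.drop_succ_cons, List.drop_zero, List.headD_cons,
      List.map_map, List.filterMap_cons]
    have hFnone : pvF keys (2 + (j : Int), k) = none := by
      unfold pvF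
      rw [if_pos]
      simp only [hfirst]; ring
    rw [hFnone]
    have hFsome : ∀ p ∈ t, pvF keys p = some (p.1, 2 + (j : Int), k) := by
      intro p hp
      obtain ⟨h1, h2⟩ := hprop p hp
      unfold pvF
      rw [h1, hfirst, if_neg (by omega)]
      have : (2 : Int) + (j : Int) = (j : Int) + 2 := by ring
      rw [this]
    rw [List.filterMap_congr hFsome]
    rw [show (fun (p : Int × (String × String × String)) => some (p.1, 2 + (j : Int), k))
      = (some ∘ (fun p => (p.1, 2 + (j : Int), k))) from rfl, List.filterMap_eq_map]
    simp [Function.comp_def]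
  rw [hdups, ← List.filterMap_flatMap]
  have hcls : ∀ x ∈ P, x.2 ∈ PySem.Set.ofList keys := by
    intro x hx
    rw [hP, PySem.List.mem_enumerate_iff] at hx
    obtain ⟨m, hm, rfl⟩ := hx
    exact (PySem.Set.mem_ofList keys _).mpr (List.getElem_mem hm)
  have hperm : (pvOrd keys).Perm
      (((PySem.Set.ofList keys).flatMap (fun c => P.filter (fun x => x.2 == c))).filterMap (pvF keys)) :=
    List.Perm.filterMap _ (pvPartition (fun q => q.2) (PySem.Set.ofList keys) P hcls (PySem.Set.nodup_ofList keys))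
  have hpw : (pvOrd keys).Pairwise (fun a b => a.1 < b.1) := by
    unfold pvOrd
    rw [List.pairwise_filterMap]
    apply List.Pairwise.imp ?_ (PySem.List.pairwise_lt_enumerate keys 2)
    intro p q hpq b hb b' hb'
    unfold pvF at hb hb'
    split at hb
    · exact absurd hb (by simp)
    · split at hb'
      · exact absurd hb' (by simp)
      · obtain rfl := Option.some.inj hb
        obtain rfl := Option.some.inj hb'
        exact hpq
  exact PySem.List.sorted_eq_of_perm_of_pairwise_lt _ _ _ hperm hpw

-- ===== VERDICT (by name: the statement is the Claim_ definition above) =====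
theorem validate_duplicate_rows_spec : Claim_equal_validate_duplicate_rows := by
  intro rows _
  unfold Spec_validate_duplicate_rows validate_duplicate_rows validate_duplicate_rows_alt
  have hkeys := pvEnumMap pvKey rows 2
  have hA := pvA_loop (rows.map pvKey) (rows.map pvKey) [] rfl []
    PySem.Dict.empty (by intro k; simp [PySem.Dict.get?_empty, PySem.List.index?_eq_idxOf?])
  have hB := pvB_eq_ord (rows.map pvKey)
  simp only [List.length_nil, Nat.cast_zero, List.nil_append, zero_add] at hA
  rw [hkeys, List.foldl_map] at hA hB
  dsimp only
  rw [hA, ← hkeys, hB]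
  simp [pvOrd]
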